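-- pv_equiv track=rewrite | github.com/pplatanias/adventofcode | src/2024/day14.py | find_connectivity
-- ===== SOURCE A (Python) =====
-- def find_connectivity(robcoords, diag=False):
--
--     conn = 0
--     coord_only = set([x[0:2] for x in robcoords])
--
--     for coord in coord_only:
--         idy, idx = coord
--         direcs = []
--         direcs.append((idy - 1, idx))
--         direcs.append((idy + 1, idx))
--         direcs.append((idy, idx + 1))
--         direcs.append((idy, idx - 1))
--         if diag:
--             direcs.append((idy - 1, idx - 1))
--             direcs.append((idy + 1, idx + 1))
--             direcs.append((idy - 1, idx + 1))
--             direcs.append((idy + 1, idx - 1))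
--
--         for direc in direcs:
--             if direc in coord_only:
--                 conn += 1
--
--     return conn
-- ===== SOURCE B (Python) =====
-- def find_connectivity(robcoords, diag=False):
--     # Brute force over unordered pairs of distinct deduplicated coordinates:
--     # count the adjacent pairs directly by coordinate arithmetic (no neighbor
--     # generation, no membership lookups), then return twice that count, since
--     # A counts every adjacency from both endpoints.
--     coords = list(set(x[0:2] for x in robcoords))
--     pairs = 0
--     for i in range(len(coords)):
--         y1, x1 = coords[i]
--         for j in range(i + 1, len(coords)):
--             y2, x2 = coords[j]
--             dy = abs(y1 - y2)
--             dx = abs(x1 - x2)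
--             if (max(dy, dx) == 1) if diag else (dy + dx == 1):
--                 pairs += 1
--     return 2 * pairs
-- ===== Notes on version B (the rewrite author's own statement) =====
-- stated objective: alternative
-- what changed: B replaces A's per-coordinate neighbor generation and set-membership probes by a brute-force scan over unordered pairs of distinct coordinates, classifying each pair as adjacent by coordinate arithmetic (Manhattan/Chebyshev distance 1) and returning twice the pair count.
import Mathlib
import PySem

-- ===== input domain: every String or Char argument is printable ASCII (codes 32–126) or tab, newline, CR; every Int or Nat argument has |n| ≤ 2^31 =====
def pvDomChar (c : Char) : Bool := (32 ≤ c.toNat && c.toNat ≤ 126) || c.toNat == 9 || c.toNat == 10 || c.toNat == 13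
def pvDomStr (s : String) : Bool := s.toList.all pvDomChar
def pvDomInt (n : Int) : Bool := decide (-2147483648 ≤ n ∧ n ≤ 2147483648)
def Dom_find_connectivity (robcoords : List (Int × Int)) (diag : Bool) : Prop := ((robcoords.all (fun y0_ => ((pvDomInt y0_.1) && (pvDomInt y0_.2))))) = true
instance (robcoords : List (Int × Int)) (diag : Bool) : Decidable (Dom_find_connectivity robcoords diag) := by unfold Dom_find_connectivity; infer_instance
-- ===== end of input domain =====

-- B replaces the per-coordinate neighbor probes by a brute-force scan over unordered
-- pairs of distinct coordinates (adjacency by distance arithmetic), doubled; same value.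

-- ===== PORT A =====
-- A iterates over set(robcoords) and counts, for every coordinate, how many of its
-- 4 (or 8, with diag) generated neighbors are members of the set.  conn is a sum
-- over the set, hence independent of Python's unspecified set iteration order.
def find_connectivity (robcoords : List (Int × Int)) (diag : Bool) : Int :=
  let coord_only : PySem.Set (Int × Int) := PySem.Set.ofList robcoords
  coord_only.foldl (fun conn coord =>
    let idy := coord.1
    let idx := coord.2
    let direcs : List (Int × Int) :=
      [(idy - 1, idx), (idy + 1, idx), (idy, idx + 1), (idy, idx - 1)] ++
      (if diag then [(idy - 1, idx - 1), (idy + 1, idx + 1), (idy - 1, idx + 1), (idy + 1, idx - 1)] else [])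
    direcs.foldl (fun conn direc =>
      if PySem.Set.contains coord_only direc then conn + 1 else conn) conn) 0

-- ===== PORT B =====
-- B's pair test: Python's 'abs' on ints ported via Int.natAbs (exact in the '== 1' tests).
def pvAdj (diag : Bool) (c d : Int × Int) : Bool :=
  let dy := (c.1 - d.1).natAbs
  let dx := (c.2 - d.2).natAbs
  if diag then max dy dx == 1 else dy + dx == 1

-- the nested index loops 'for i … for j in range(i+1, …)' as structural recursion:
-- head against the tail, then recurse on the tail
def pvPairs (diag : Bool) : List (Int × Int) → Int
  | [] => 0
  | c :: rest => (rest.countP (pvAdj diag c) : Int) + pvPairs diag rest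

def find_connectivity_alt (robcoords : List (Int × Int)) (diag : Bool) : Int :=
  let coords : PySem.Set (Int × Int) := PySem.Set.ofList robcoords
  2 * pvPairs diag coords

-- ===== PRECONDITION & SPEC =====
def Spec_find_connectivity (robcoords : List (Int × Int)) (diag : Bool) (out : Int) : Prop := out = find_connectivity_alt robcoords diag
instance (robcoords : List (Int × Int)) (diag : Bool) (out : Int) : Decidable (Spec_find_connectivity robcoords diag out) := by unfold Spec_find_connectivity; infer_instance

-- ===== CLAIM (what is proved, stated in full; the proofs are below) =====
def Claim_equal_find_connectivity : Prop := ∀ (robcoords : List (Int × Int)) (diag : Bool), Dom_find_connectivity robcoords diag → Spec_find_connectivity robcoords diag (find_connectivity robcoords diag)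

-- ===== LEMMAS AND PROOFS =====

-- the 4/8 neighbor offsets A generates for c
def pvDirecs (diag : Bool) (c : Int × Int) : List (Int × Int) :=
  [(c.1 - 1, c.2), (c.1 + 1, c.2), (c.1, c.2 + 1), (c.1, c.2 - 1)] ++
  (if diag then [(c.1 - 1, c.2 - 1), (c.1 + 1, c.2 + 1), (c.1 - 1, c.2 + 1), (c.1 + 1, c.2 - 1)] else [])

lemma pvAdj_symm (diag : Bool) (c d : Int × Int) : pvAdj diag c d = pvAdj diag d c := by
  have h1 : (c.1 - d.1).natAbs = (d.1 - c.1).natAbs := by omega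
  have h2 : (c.2 - d.2).natAbs = (d.2 - c.2).natAbs := by omega
  simp [pvAdj, h1, h2]

lemma pvAdj_irrefl (diag : Bool) (c : Int × Int) : pvAdj diag c c = false := by
  cases diag <;> simp [pvAdj]

lemma mem_pvDirecs (diag : Bool) (c d : Int × Int) :
    (pvDirecs diag c).contains d = pvAdj diag c d := by
  rcases c with ⟨y, x⟩
  rcases d with ⟨v, u⟩
  rw [Bool.eq_iff_iff]
  cases diag <;> simp [pvDirecs, pvAdj, Prod.ext_iff] <;> omega

lemma pvDirecs_nodup (diag : Bool) (c : Int × Int) : (pvDirecs diag c).Nodup := by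
  rcases c with ⟨y, x⟩
  cases diag <;> simp [pvDirecs, Prod.ext_iff] <;> omega

-- counting T's members in S = counting S's members in T, for duplicate-free lists
lemma countP_contains_swap (S T : List (Int × Int)) (hS : S.Nodup) (hT : T.Nodup) :
    S.countP (fun d => T.contains d) = T.countP (fun d => S.contains d) := by
  have key : ∀ (U V : List (Int × Int)), U.Nodup →
      U.countP (fun d => V.contains d) = (U.toFinset ∩ V.toFinset).card := by
    intro U V hU
    rw [List.countP_eq_length_filter, ← List.toFinset_card_of_nodup
      (hU.filter (fun d => V.contains d)), List.toFinset_filter]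
    congr 1
    ext d
    simp [Finset.mem_filter, List.mem_toFinset]
  rw [key S T hS, key T S hT, Finset.inter_comm]

-- A's double loop as a sum of neighbor counts over the deduplicated list
lemma A_eq_sum (robcoords : List (Int × Int)) (diag : Bool) :
    find_connectivity robcoords diag =
      ((PySem.Set.ofList robcoords).map (fun c =>
        ((pvDirecs diag c).countP
          (fun d => PySem.Set.contains (PySem.Set.ofList robcoords) d) : Int))).sum := by
  unfold find_connectivity
  simp only [PySem.List.foldl_if_add_one, PySem.List.foldl_add, zero_add, pvDirecs]

-- each element's neighbor count equals its pvAdj-count over the set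
lemma count_direcs_eq (robcoords : List (Int × Int)) (diag : Bool) (c : Int × Int) :
    (pvDirecs diag c).countP (fun d => PySem.Set.contains (PySem.Set.ofList robcoords) d)
      = (PySem.Set.ofList robcoords).countP (pvAdj diag c) := by
  simp only [PySem.Set.contains_eq_listContains]
  rw [countP_contains_swap _ _ (pvDirecs_nodup diag c) (PySem.Set.nodup_ofList robcoords),
    List.countP_congr (fun d _ => by rw [mem_pvDirecs diag c d])]

-- the doubling identity: twice the over-unordered-pairs count is the sum of
-- per-element counts, for any symmetric irreflexive adjacency test
lemma two_mul_pvPairs (diag : Bool) (S : List (Int × Int)) :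
    2 * pvPairs diag S = (S.map (fun c => (S.countP (pvAdj diag c) : Int))).sum := by
  induction S with
  | nil => simp [pvPairs]
  | cons c rest ih =>
    simp only [pvPairs, List.map_cons, List.sum_cons, List.countP_cons, pvAdj_irrefl,
      Bool.false_eq_true, if_false, Nat.add_zero]
    have hmap : (rest.map (fun d =>
        ((rest.countP (pvAdj diag d) + if pvAdj diag d c = true then 1 else 0 : Nat) : Int))).sum
        = (rest.map (fun d => (rest.countP (pvAdj diag d) : Int))).sum
          + (rest.countP (pvAdj diag c) : Int) := by
      have h1 : (rest.map (fun d =>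
          ((rest.countP (pvAdj diag d) + if pvAdj diag d c = true then 1 else 0 : Nat) : Int)))
          = rest.map (fun d => (rest.countP (pvAdj diag d) : Int)
            + (if pvAdj diag c d = true then (1 : Int) else 0)) := by
        refine List.map_congr_left (fun d _ => ?_)
        rw [pvAdj_symm diag c d]
        push_cast
        split <;> simp
      rw [h1, PySem.List.sum_map_add_int, PySem.List.sum_map_ite_one_zero]
    rw [hmap]
    rw [← ih]
    ring

-- ===== VERDICT (by name: the statement is the Claim_ definition above) =====
theorem find_connectivity_spec : Claim_equal_find_connectivity := by
  intro robcoords diag _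
  unfold Spec_find_connectivity
  show find_connectivity robcoords diag = 2 * pvPairs diag (PySem.Set.ofList robcoords)
  have hm : ((PySem.Set.ofList robcoords).map (fun c =>
        ((pvDirecs diag c).countP
          (fun d => PySem.Set.contains (PySem.Set.ofList robcoords) d) : Int)))
      = ((PySem.Set.ofList robcoords).map (fun c =>
        (((PySem.Set.ofList robcoords).countP (pvAdj diag c)) : Int))) :=
    List.map_congr_left (fun c _ => by rw [count_direcs_eq robcoords diag c])
  rw [A_eq_sum, hm, ← two_mul_pvPairs]
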